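-- pv_equiv track=rewrite | github.com/Lukas262003/RSU-Studienarbeit | Dashboard/automated_scenarios.py | get_current_phase
-- ===== SOURCE A (Python) =====
-- TRAFFIC_CYCLE = [
--     ("ns_red_yellow", 2),
--     ("ns_green", 10),
--     ("ns_yellow", 3),
--     ("all_red", 2),
--     ("ew_red_yellow", 2),
--     ("ew_green", 10),
--     ("ew_yellow", 3),
--     ("all_red", 2)
-- ]
--
-- def get_current_phase(n_clicks):
--     elapsed_time = n_clicks
--     cycle_time = sum(t[1] for t in TRAFFIC_CYCLE)
--     elapsed_time = elapsed_time % cycle_time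
--
--     for phase, duration in TRAFFIC_CYCLE:
--         if elapsed_time < duration:
--             return phase, int(duration - elapsed_time)
--         elapsed_time -= duration
--     return "all_red", 0
-- ===== SOURCE B (Python) =====
-- import bisect
--
-- TRAFFIC_CYCLE = [
--     ("ns_red_yellow", 2),
--     ("ns_green", 10),
--     ("ns_yellow", 3),
--     ("all_red", 2),
--     ("ew_red_yellow", 2),
--     ("ew_green", 10),
--     ("ew_yellow", 3),
--     ("all_red", 2)
-- ]
--
-- _PREFIX_ENDS = []
-- _acc = 0
-- for _phase, _d in TRAFFIC_CYCLE:
--     _acc += _d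
--     _PREFIX_ENDS.append(_acc)
-- _CYCLE_TIME = _acc
--
-- def get_current_phase(n_clicks):
--     elapsed = n_clicks % _CYCLE_TIME
--     idx = bisect.bisect_right(_PREFIX_ENDS, elapsed)
--     return TRAFFIC_CYCLE[idx][0], int(_PREFIX_ENDS[idx] - elapsed)
-- ===== Notes on version B (the rewrite author's own statement) =====
-- stated objective: idiomatic
-- what changed: Replaced the running-accumulator subtract-and-scan loop with a precomputed prefix-sum table of phase end-times and a single bisect_right lookup.
import Mathlib
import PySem

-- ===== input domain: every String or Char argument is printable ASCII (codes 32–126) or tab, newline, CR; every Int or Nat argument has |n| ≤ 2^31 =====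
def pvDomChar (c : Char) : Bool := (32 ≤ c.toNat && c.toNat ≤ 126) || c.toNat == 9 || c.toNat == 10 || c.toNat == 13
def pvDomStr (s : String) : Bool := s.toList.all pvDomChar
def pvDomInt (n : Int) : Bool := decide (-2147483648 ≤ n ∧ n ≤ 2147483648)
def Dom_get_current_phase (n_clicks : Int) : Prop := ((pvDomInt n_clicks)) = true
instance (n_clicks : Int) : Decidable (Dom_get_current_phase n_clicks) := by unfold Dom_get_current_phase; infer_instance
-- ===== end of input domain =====

-- B replaces A's subtract-and-scan loop by a precomputed prefix-sum table of phase
-- end-times and one bisect_right lookup (idiomatic; same return value everywhere).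

-- ===== PORT A =====
def pvTrafficCycle : List (String × Int) :=
  [("ns_red_yellow", 2), ("ns_green", 10), ("ns_yellow", 3), ("all_red", 2),
   ("ew_red_yellow", 2), ("ew_green", 10), ("ew_yellow", 3), ("all_red", 2)]

-- the for-loop of A with early return
def pvScanA : Int → List (String × Int) → String × Int
  | _, [] => ("all_red", 0)
  | e, (phase, duration) :: rest =>
      if e < duration then (phase, duration - e) else pvScanA (e - duration) rest

def get_current_phase (n_clicks : Int) : String × Int :=
  let cycle_time : Int := (pvTrafficCycle.map (fun t => t.2)).sum
  let elapsed_time : Int := PySem.Int.mod n_clicks cycle_time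
  pvScanA elapsed_time pvTrafficCycle

-- ===== PORT B =====
-- module-level table build of Source B: prefix sums of the durations
def pvPrefixBuild : List Int × Int :=
  pvTrafficCycle.foldl (fun st pd => (st.1 ++ [st.2 + pd.2], st.2 + pd.2)) ([], 0)

def pvPrefixEnds : List Int := pvPrefixBuild.1
def pvCycleTime : Int := pvPrefixBuild.2

def get_current_phase_alt (n_clicks : Int) : String × Int :=
  let elapsed : Int := PySem.Int.mod n_clicks pvCycleTime
  let idx : Nat := PySem.List.bisectRight pvPrefixEnds elapsed
  -- Python's TRAFFIC_CYCLE[idx] / _PREFIX_ENDS[idx]: idx ≤ 7 here since elapsed < 34,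
  -- the last table entry, so the default of pyGetD is never used (exact)
  ((PySem.List.pyGetD pvTrafficCycle (idx : Int) ("", 0)).1,
   PySem.List.pyGetD pvPrefixEnds (idx : Int) 0 - elapsed)

-- ===== PRECONDITION & SPEC =====
def Spec_get_current_phase (n_clicks : Int) (out : String × Int) : Prop := out = get_current_phase_alt n_clicks
instance (n_clicks : Int) (out : String × Int) : Decidable (Spec_get_current_phase n_clicks out) := by unfold Spec_get_current_phase; infer_instance

-- ===== CLAIM (what is proved, stated in full; the proofs are below) =====
def Claim_equal_get_current_phase : Prop := ∀ (n_clicks : Int), Dom_get_current_phase n_clicks → Spec_get_current_phase n_clicks (get_current_phase n_clicks)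

-- ===== LEMMAS AND PROOFS =====
-- both programs agree on every residue 0 ≤ e < 34
lemma pv_agree_on_residue (e : Int) (h0 : 0 ≤ e) (h1 : e < 34) :
    pvScanA e pvTrafficCycle =
      ((PySem.List.pyGetD pvTrafficCycle ((PySem.List.bisectRight pvPrefixEnds e : Nat) : Int) ("", 0)).1,
       PySem.List.pyGetD pvPrefixEnds ((PySem.List.bisectRight pvPrefixEnds e : Nat) : Int) 0 - e) := by
  interval_cases e <;> decide

-- ===== VERDICT (by name: the statement is the Claim_ definition above) =====
theorem get_current_phase_spec : Claim_equal_get_current_phase := by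
  intro n _
  unfold Spec_get_current_phase get_current_phase get_current_phase_alt
  have hsum : (pvTrafficCycle.map (fun t => t.2)).sum = (34 : Int) := by decide
  have hct : pvCycleTime = (34 : Int) := by decide
  simp only [hsum, hct]
  exact pv_agree_on_residue _ (PySem.Int.mod_nonneg n (by norm_num)) (PySem.Int.mod_lt n (by norm_num))
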